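-- pv_equiv track=rewrite | github.com/DASPRiD/DASBiT | dasbit/irc/ctcp.py | dequote
-- ===== SOURCE A (Python) =====
-- def dequote(quoteMap, quoteChar, string):
--     result     = ''
--     length     = len(string)
--     currentPos = 0
--
--     while currentPos < length:
--         if string[currentPos] == quoteChar:
--             currentPos += 1
--
--             if currentPos < length:
--                 if string[currentPos] in quoteMap:
--                     result += quoteMap[string[currentPos]]
--                 else:
--                     result += string[currentPos]
--
--                 currentPos += 1
--         else:
--             result     += string[currentPos]
--             currentPos += 1
--
--     return result
-- ===== SOURCE B (Python) =====
-- def dequote(quoteMap, quoteChar, string):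
--     # Staged approach: cut the string at quoteChar once, then reassemble the
--     # pieces, mapping the first char of each piece through quoteMap.
--     if len(quoteChar) != 1:
--         # only a single character can ever match a one-char read
--         return string
--     parts = string.split(quoteChar)
--     out = [parts[0]]
--     i = 1
--     n = len(parts)
--     while i < n:
--         p = parts[i]
--         if p:
--             out.append(quoteMap.get(p[0], p[0]) + p[1:])
--             i += 1
--         elif i + 1 < n:
--             # empty piece: the escaped char was the delimiter itself
--             out.append(quoteMap.get(quoteChar, quoteChar))
--             out.append(parts[i + 1])
--             i += 2
--         else:
--             i += 1  # trailing quoteChar: escapes nothing, dropped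
--     return ''.join(out)
-- ===== Notes on version B (the rewrite author's own statement) =====
-- stated objective: faster
-- what changed: Replaces A's one-at-a-time index scan with repeated string += by a staged algorithm: split the string on quoteChar once, then reassemble the pieces, mapping the first character of each piece (or the delimiter itself for an empty piece) through quoteMap, joining once at the end.
import Mathlib
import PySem

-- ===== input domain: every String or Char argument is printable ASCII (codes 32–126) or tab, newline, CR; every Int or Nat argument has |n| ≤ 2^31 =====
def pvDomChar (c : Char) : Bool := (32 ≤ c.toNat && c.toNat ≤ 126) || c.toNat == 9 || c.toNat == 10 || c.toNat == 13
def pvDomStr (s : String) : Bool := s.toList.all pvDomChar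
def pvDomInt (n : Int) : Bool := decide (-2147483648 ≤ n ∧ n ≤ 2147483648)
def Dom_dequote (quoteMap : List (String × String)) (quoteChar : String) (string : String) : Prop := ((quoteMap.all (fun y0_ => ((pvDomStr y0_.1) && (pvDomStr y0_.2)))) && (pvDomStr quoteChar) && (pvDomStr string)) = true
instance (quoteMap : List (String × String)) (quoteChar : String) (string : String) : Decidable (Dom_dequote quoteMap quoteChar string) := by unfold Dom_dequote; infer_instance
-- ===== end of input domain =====

-- B replaces A's one-at-a-time index scan with a staged algorithm: split the string on
-- quoteChar once, then reassemble the pieces through quoteMap, joined once (objective: faster,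
-- measured: repeated += in A is quadratic, B is linear).


-- ===== PORT A =====
-- A: index-driven while loop accumulating into a growing string, exactly as the Python scans.
def dequoteLoop (quoteMap : List (String × String)) (quoteChar : String)
    (cs : List Char) (length currentPos : Nat) (result : String) : String :=
  if _h : currentPos < length then
    let c := cs.getD currentPos ' '
    if String.mk [c] = quoteChar then
      -- currentPos += 1
      if h2 : currentPos + 1 < length then
        let d := cs.getD (currentPos + 1) ' '
        let result :=
          match quoteMap.lookup (String.mk [d]) with   -- 'in quoteMap' then 'quoteMap[...]'
          | some v => result ++ v
          | none => result ++ String.mk [d]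
        dequoteLoop quoteMap quoteChar cs length (currentPos + 2) result
      else
        result   -- loop condition fails on the next iteration
    else
      dequoteLoop quoteMap quoteChar cs length (currentPos + 1) (result ++ String.mk [c])
  else
    result
termination_by length - currentPos

def dequote (quoteMap : List (String × String)) (quoteChar : String) (string : String) : String :=
  dequoteLoop quoteMap quoteChar string.toList string.toList.length 0 ""

-- ===== PORT B =====
-- hand port of string.split(quoteChar) for a single-char separator (exact there:
-- splitting '' gives [''], k separators give k+1 pieces)
def splitChar (q : Char) : List Char → List (List Char)
  | [] => [[]]
  | c :: rest =>
    if c = q then [] :: splitChar q rest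
    else
      match splitChar q rest with
      | [] => [[c]]            -- unreachable: splitChar never returns []
      | p :: ps => (c :: p) :: ps

-- the while loop over parts[1:], advancing by one piece (nonempty or trailing) or two (empty piece)
def partsLoop (quoteMap : List (String × String)) (quoteChar : String) :
    List (List Char) → List String
  | [] => []
  | p :: rest =>
    match p with
    | c :: tail =>
      ((quoteMap.lookup (String.mk [c])).getD (String.mk [c]) ++ String.mk tail)
        :: partsLoop quoteMap quoteChar rest
    | [] =>
      match rest with
      | [] => []               -- trailing quoteChar: escapes nothing, dropped
      | p2 :: rest2 =>
        (quoteMap.lookup quoteChar).getD quoteChar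
          :: String.mk p2 :: partsLoop quoteMap quoteChar rest2

def dequote_alt (quoteMap : List (String × String)) (quoteChar : String) (string : String) : String :=
  match quoteChar.toList with
  | [q] =>
    match splitChar q string.toList with
    | [] => ""                 -- unreachable: splitChar never returns []
    | p0 :: rest => String.mk p0 ++ String.join (partsLoop quoteMap quoteChar rest)
  | _ => string                -- len(quoteChar) != 1: a one-char read never matches it

-- ===== PRECONDITION & SPEC =====
def Spec_dequote (quoteMap : List (String × String)) (quoteChar : String) (string : String) (out : String) : Prop := out = dequote_alt quoteMap quoteChar string
instance (quoteMap : List (String × String)) (quoteChar : String) (string : String) (out : String) : Decidable (Spec_dequote quoteMap quoteChar string out) := by unfold Spec_dequote; infer_instance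

-- ===== CLAIM (what is proved, stated in full; the proofs are below) =====
def Claim_equal_dequote : Prop := ∀ (quoteMap : List (String × String)) (quoteChar : String) (string : String), Dom_dequote quoteMap quoteChar string → Spec_dequote quoteMap quoteChar string (dequote quoteMap quoteChar string)

-- ===== LEMMAS AND PROOFS =====

-- reference recursion: what one dequoting step produces on the remaining suffix
def refDeq (quoteMap : List (String × String)) (quoteChar : String) : List Char → String
  | [] => ""
  | c :: rest =>
    if String.mk [c] = quoteChar then
      match rest with
      | [] => ""
      | d :: rest' =>
        (quoteMap.lookup (String.mk [d])).getD (String.mk [d]) ++ refDeq quoteMap quoteChar rest'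
    else
      String.mk [c] ++ refDeq quoteMap quoteChar rest

-- A's loop from position pos computes refDeq on the remaining suffix
theorem dequoteLoop_eq_ref (quoteMap : List (String × String)) (quoteChar : String)
    (cs : List Char) : ∀ (pos : Nat) (result : String),
    dequoteLoop quoteMap quoteChar cs cs.length pos result
      = result ++ refDeq quoteMap quoteChar (cs.drop pos)
  | pos, result => by
    by_cases h : pos < cs.length
    · have hdrop : cs.drop pos = cs[pos] :: cs.drop (pos + 1) := List.drop_eq_getElem_cons h
      have hget : cs.getD pos ' ' = cs[pos] := List.getD_eq_getElem cs ' ' h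
      rw [dequoteLoop.eq_def, hdrop]
      simp only [h, dite_true, hget]
      by_cases hq : String.mk [cs[pos]] = quoteChar
      · rw [refDeq.eq_def]
        simp only []
        rw [if_pos hq, if_pos hq]
        by_cases h2 : pos + 1 < cs.length
        · have hdrop2 : cs.drop (pos + 1) = cs[pos + 1] :: cs.drop (pos + 2) :=
            List.drop_eq_getElem_cons h2
          have hget2 : cs.getD (pos + 1) ' ' = cs[pos + 1] := List.getD_eq_getElem cs ' ' h2
          rw [hdrop2]
          simp only [h2, dite_true, hget2]
          rw [dequoteLoop_eq_ref quoteMap quoteChar cs (pos + 2)]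
          cases hl : quoteMap.lookup (String.mk [cs[pos + 1]]) with
          | none => simp [String.append_assoc, -List.getElem_cons_drop]
          | some v => simp [String.append_assoc, -List.getElem_cons_drop]
        · have he : cs.drop (pos + 1) = [] := List.drop_eq_nil_of_le (by omega)
          rw [he]
          simp [h2, -List.getElem_cons_drop]
      · rw [refDeq.eq_def]
        simp only []
        rw [if_neg hq, if_neg hq]
        rw [dequoteLoop_eq_ref quoteMap quoteChar cs (pos + 1)]
        simp [String.append_assoc, -List.getElem_cons_drop]
    · have hdrop : cs.drop pos = [] := List.drop_eq_nil_of_le (by omega)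
      rw [dequoteLoop.eq_def, hdrop]
      simp [h, refDeq]

termination_by pos _ => cs.length - pos
decreasing_by all_goals omega

-- splitChar never returns the empty list
theorem splitChar_ne_nil (q : Char) (cs : List Char) : splitChar q cs ≠ [] := by
  cases cs with
  | nil => simp [splitChar]
  | cons c rest =>
    by_cases h : c = q
    · simp [splitChar, h]
    · simp only [splitChar, h, if_false]
      cases splitChar q rest <;> simp

-- String.mk / toList bridges
theorem toList_mk (l : List Char) : (String.mk l).toList = l :=
  (String.ofList_eq.mp rfl).symm

theorem mk_toList (s : String) : String.mk s.toList = s :=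
  String.ext (toList_mk _)

theorem foldl_str_append (l : List String) :
    ∀ s : String, l.foldl (fun r x => r ++ x) s = s ++ l.foldl (fun r x => r ++ x) "" := by
  induction l with
  | nil => simp
  | cons a l ih =>
    intro s
    simp only [List.foldl_cons]
    rw [ih (s ++ a), ih ("" ++ a)]
    simp [String.append_assoc]

theorem join_cons (s : String) (l : List String) :
    String.join (s :: l) = s ++ String.join l := by
  simp only [String.join, List.foldl_cons]
  rw [foldl_str_append]
  simp

-- when quoteChar is not a single character, a one-char read never equals it
theorem refDeq_of_not_single (quoteMap : List (String × String)) (quoteChar : String)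
    (hq : ∀ c : Char, String.mk [c] ≠ quoteChar) :
    ∀ cs : List Char, refDeq quoteMap quoteChar cs = String.mk cs := by
  intro cs
  induction cs with
  | nil =>
    rw [refDeq.eq_1]
    apply String.ext
    simp [toList_mk]
  | cons c rest ih =>
    rw [refDeq.eq_def]
    simp only []
    rw [if_neg (hq c), ih]
    apply String.ext
    simp [String.toList_append, toList_mk]

-- B's split-then-reassemble computes refDeq when quoteChar is the single char q
theorem split_reassemble_eq_ref (quoteMap : List (String × String)) (q : Char) :
    ∀ (cs p0 : List Char) (rest : List (List Char)), splitChar q cs = p0 :: rest →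
    String.mk p0 ++ String.join (partsLoop quoteMap (String.mk [q]) rest)
      = refDeq quoteMap (String.mk [q]) cs
  | [], p0, rest, h => by
    rw [splitChar.eq_1] at h
    injection h with h1 h2
    subst h1; subst h2
    rw [refDeq.eq_1, partsLoop.eq_1]
    apply String.ext
    simp [toList_mk, String.join]
  | c :: cs', p0, rest, h => by
    rw [splitChar.eq_2] at h
    by_cases hc : c = q
    · rw [if_pos hc] at h
      injection h with h1 h2
      subst h1
      have hcq : String.mk [c] = String.mk [q] := by rw [hc]
      cases cs' with
      | nil =>
        rw [splitChar.eq_1] at h2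
        subst h2
        rw [refDeq.eq_def]
        simp only []
        rw [if_pos hcq]
        have hp : partsLoop quoteMap (String.mk [q]) [[]] = [] := by
          rw [partsLoop.eq_def]
        rw [hp]
        apply String.ext
        simp [toList_mk, String.join]
      | cons d cs'' =>
        obtain ⟨p0', rest', hsp⟩ : ∃ p0' rest', splitChar q cs'' = p0' :: rest' := by
          cases hx : splitChar q cs'' with
          | nil => exact absurd hx (splitChar_ne_nil q cs'')
          | cons a b => exact ⟨a, b, rfl⟩
        have ih := split_reassemble_eq_ref quoteMap q cs'' p0' rest' hsp
        rw [splitChar.eq_2] at h2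
        by_cases hd : d = q
        · -- empty piece followed by more pieces: escaped char is the delimiter itself
          rw [if_pos hd, hsp] at h2
          subst h2
          have hp : partsLoop quoteMap (String.mk [q]) ([] :: p0' :: rest')
              = (quoteMap.lookup (String.mk [q])).getD (String.mk [q])
                  :: String.mk p0' :: partsLoop quoteMap (String.mk [q]) rest' := by
            rw [partsLoop.eq_def]
          rw [hp, join_cons, join_cons]
          rw [refDeq.eq_def]
          simp only []
          rw [if_pos hcq]
          have hdq : String.mk [d] = String.mk [q] := by rw [hd]
          rw [hdq, ← ih]
          apply String.ext
          simp [String.toList_append, toList_mk]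
        · -- nonempty second piece: map its head, keep its tail
          rw [if_neg hd, hsp] at h2
          subst h2
          have hp : partsLoop quoteMap (String.mk [q]) ((d :: p0') :: rest')
              = ((quoteMap.lookup (String.mk [d])).getD (String.mk [d]) ++ String.mk p0')
                  :: partsLoop quoteMap (String.mk [q]) rest' := by
            rw [partsLoop.eq_def]
          rw [hp, join_cons]
          rw [refDeq.eq_def]
          simp only []
          rw [if_pos hcq, ← ih]
          apply String.ext
          simp [String.toList_append, toList_mk]
    · rw [if_neg hc] at h
      obtain ⟨p0', rest', hsp⟩ : ∃ p0' rest', splitChar q cs' = p0' :: rest' := by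
        cases hx : splitChar q cs' with
        | nil => exact absurd hx (splitChar_ne_nil q cs')
        | cons a b => exact ⟨a, b, rfl⟩
      have ih := split_reassemble_eq_ref quoteMap q cs' p0' rest' hsp
      rw [hsp] at h
      simp only [] at h
      injection h with h1 h2
      subst h1; subst h2
      have hq' : ¬ String.mk [c] = String.mk [q] := by
        intro hx
        have := congrArg String.toList hx
        rw [toList_mk, toList_mk] at this
        exact hc (by injection this)
      rw [refDeq.eq_def]
      simp only []
      rw [if_neg hq', ← ih]
      apply String.ext
      simp [String.toList_append, toList_mk]
termination_by cs => cs.length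

-- ===== VERDICT (by name: the statement is the Claim_ definition above) =====
theorem dequote_spec : Claim_equal_dequote := by
  intro quoteMap quoteChar string _
  unfold Spec_dequote dequote dequote_alt
  rw [dequoteLoop_eq_ref quoteMap quoteChar string.toList 0 "", List.drop_zero]
  cases hqc : quoteChar.toList with
  | nil =>
    have hq : ∀ c : Char, String.mk [c] ≠ quoteChar := by
      intro c hx
      have h2 := congrArg String.toList hx
      rw [toList_mk, hqc] at h2
      simp at h2
    rw [refDeq_of_not_single quoteMap quoteChar hq string.toList, mk_toList]
    simp
  | cons q t =>
    cases t with
    | nil =>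
      have hqc' : quoteChar = String.mk [q] := by
        apply String.ext
        rw [toList_mk, hqc]
      obtain ⟨p0, rest, hsp⟩ : ∃ p0 rest, splitChar q string.toList = p0 :: rest := by
        cases hx : splitChar q string.toList with
        | nil => exact absurd hx (splitChar_ne_nil q string.toList)
        | cons a b => exact ⟨a, b, rfl⟩
      have hs := split_reassemble_eq_ref quoteMap q string.toList p0 rest hsp
      simp only []
      rw [hsp]
      simp only []
      rw [hqc', hs]
      simp
    | cons q2 t2 =>
      have hq : ∀ c : Char, String.mk [c] ≠ quoteChar := by
        intro c hx
        have h2 := congrArg String.toList hx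
        rw [toList_mk, hqc] at h2
        simp at h2
      rw [refDeq_of_not_single quoteMap quoteChar hq string.toList, mk_toList]
      simp
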